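-- pv_equiv track=rewrite | github.com/taeyoung0823/Algorithm | 프로그래머스/0/181928. 이어 붙인 수/이어 붙인 수.py | solution
-- ===== SOURCE A (Python) =====
-- def solution(num_list):
--     answer = 0
--     even = 0
--     odd = 0
--     for i in range(len(num_list)):
--         if num_list[i]%2==0:
--             even *= 10
--             even += num_list[i]
--         else:
--             odd *= 10
--             odd += num_list[i]
--     return even+odd
-- ===== SOURCE B (Python) =====
-- def solution(num_list):
--     # Back-to-front: each element weighs 10^(number of same-parity elements after it);
--     # one running total, two place-value counters.
--     total = 0
--     pow_even = 1
--     pow_odd = 1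
--     for x in reversed(num_list):
--         if x % 2 == 0:
--             total += x * pow_even
--             pow_even *= 10
--         else:
--             total += x * pow_odd
--             pow_odd *= 10
--     return total
-- ===== Notes on version B (the rewrite author's own statement) =====
-- stated objective: alternative
-- what changed: B traverses the list back-to-front and sums each element times an explicit power-of-ten place value per parity (one running total), instead of A's forward Horner-style acc*10+x accumulation into two concatenated numbers.
import Mathlib
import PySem

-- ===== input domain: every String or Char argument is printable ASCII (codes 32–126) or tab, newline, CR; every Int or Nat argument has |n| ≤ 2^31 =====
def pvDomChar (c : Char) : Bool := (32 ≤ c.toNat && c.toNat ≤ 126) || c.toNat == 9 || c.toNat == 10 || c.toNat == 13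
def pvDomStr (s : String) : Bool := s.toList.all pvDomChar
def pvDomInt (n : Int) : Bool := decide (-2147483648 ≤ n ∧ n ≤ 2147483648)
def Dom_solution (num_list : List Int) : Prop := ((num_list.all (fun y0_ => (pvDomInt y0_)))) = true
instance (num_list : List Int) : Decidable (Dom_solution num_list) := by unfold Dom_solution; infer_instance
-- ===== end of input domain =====

-- B builds the result back-to-front with explicit power-of-ten place values per parity instead of A's forward acc*10+x accumulation (alternative decomposition, same cost).


-- ===== PORT A =====
-- A: one pass over indices, threading (even, odd) Horner accumulators; returns even+odd.
def solution (num_list : List Int) : Int :=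
  let s := (PySem.List.pyRange 0 (num_list.length : Int) 1).foldl
    (fun (s : Int × Int) i =>
      if PySem.Int.mod (PySem.List.pyGetD num_list i 0) 2 == 0 then
        (s.1 * 10 + PySem.List.pyGetD num_list i 0, s.2)
      else (s.1, s.2 * 10 + PySem.List.pyGetD num_list i 0))
    (0, 0)
  s.1 + s.2

-- ===== PORT B =====
-- B: reversed traversal; one running total plus two place-value counters.
def solution_alt (num_list : List Int) : Int :=
  (num_list.reverse.foldl
    (fun (s : Int × Int × Int) x =>
      if PySem.Int.mod x 2 == 0 then (s.1 + x * s.2.1, s.2.1 * 10, s.2.2)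
      else (s.1 + x * s.2.2, s.2.1, s.2.2 * 10))
    (0, 1, 1)).1

-- ===== PRECONDITION & SPEC =====
def Spec_solution (num_list : List Int) (out : Int) : Prop := out = solution_alt num_list
instance (num_list : List Int) (out : Int) : Decidable (Spec_solution num_list out) := by unfold Spec_solution; infer_instance

-- ===== CLAIM (what is proved, stated in full; the proofs are below) =====
def Claim_equal_solution : Prop := ∀ (num_list : List Int), Dom_solution num_list → Spec_solution num_list (solution num_list)

-- ===== LEMMAS AND PROOFS =====

-- Horner fold used to characterise both sides.
def pvH (xs : List Int) : Int := xs.foldl (fun acc x => acc * 10 + x) 0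

lemma pvH_shift (xs : List Int) (e : Int) :
    xs.foldl (fun acc x => acc * 10 + x) e = e * 10 ^ xs.length + pvH xs := by
  induction xs generalizing e with
  | nil => simp only [List.foldl_nil, pvH, List.length_nil, pow_zero]; ring
  | cons a t ih =>
    have h2 : pvH (a :: t) = a * 10 ^ t.length + pvH t := by
      simp only [pvH, List.foldl_cons, zero_mul, zero_add]
      rw [ih a]
      rfl
    simp only [List.foldl_cons]
    rw [ih (e * 10 + a), h2, List.length_cons]
    ring

-- A's loop splits into the Horner folds of the even and odd sublists.
lemma pv_fold_split (xs : List Int) (e o : Int) :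
    xs.foldl
      (fun (s : Int × Int) x =>
        if PySem.Int.mod x 2 == 0 then (s.1 * 10 + x, s.2) else (s.1, s.2 * 10 + x))
      (e, o)
    = ((xs.filter (fun x => PySem.Int.mod x 2 == 0)).foldl (fun acc x => acc * 10 + x) e,
       (xs.filter (fun x => !(PySem.Int.mod x 2 == 0))).foldl (fun acc x => acc * 10 + x) o) := by
  induction xs generalizing e o with
  | nil => rfl
  | cons a t ih =>
    cases h : PySem.Int.mod a 2 == 0 <;>
      simp only [List.foldl_cons, List.filter_cons, h, Bool.not_true, Bool.not_false,
        if_true, if_false, Bool.false_eq_true, ih]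

-- B's reversed loop computes (t + pe·H(evens) + po·H(odds), pe·10^#evens, po·10^#odds).
lemma pv_rev_fold (xs : List Int) (t pe po : Int) :
    xs.reverse.foldl
      (fun (s : Int × Int × Int) x =>
        if PySem.Int.mod x 2 == 0 then (s.1 + x * s.2.1, s.2.1 * 10, s.2.2)
        else (s.1 + x * s.2.2, s.2.1, s.2.2 * 10))
      (t, pe, po)
    = (t + pe * pvH (xs.filter (fun x => PySem.Int.mod x 2 == 0))
         + po * pvH (xs.filter (fun x => !(PySem.Int.mod x 2 == 0))),
       pe * 10 ^ (xs.filter (fun x => PySem.Int.mod x 2 == 0)).length,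
       po * 10 ^ (xs.filter (fun x => !(PySem.Int.mod x 2 == 0))).length) := by
  induction xs generalizing t pe po with
  | nil => simp [pvH]
  | cons a tl ih =>
    have hH : ∀ l : List Int, pvH (a :: l) = a * 10 ^ l.length + pvH l := by
      intro l
      simp only [pvH, List.foldl_cons, zero_mul, zero_add]
      rw [pvH_shift l a]
      rfl
    cases h : PySem.Int.mod a 2 == 0 <;>
      simp only [List.reverse_cons, List.foldl_append, List.foldl_cons, List.foldl_nil,
        List.filter_cons, h, Bool.not_true, Bool.not_false, Bool.false_eq_true,
        ite_true, ite_false, ih, hH, List.length_cons] <;>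
      refine Prod.ext ?_ (Prod.ext ?_ ?_) <;> simp <;> ring

-- ===== VERDICT (by name: the statement is the Claim_ definition above) =====
theorem solution_spec : Claim_equal_solution := by
  intro num_list _
  simp only [Spec_solution, solution, solution_alt]
  rw [PySem.List.foldl_pyRange_zero_pyGetD' num_list 0
      (fun (s : Int × Int) x =>
        if PySem.Int.mod x 2 == 0 then (s.1 * 10 + x, s.2) else (s.1, s.2 * 10 + x)) (0, 0)]
  rw [pv_fold_split, pv_rev_fold]
  simp only [pvH]
  ring
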